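-- pv_equiv track=rewrite | github.com/raikoug/AoCv2 | python/aoc_solutions/2023/day_11.py | _expanded_distance
-- ===== SOURCE A (Python) =====
-- from typing import List, Optional, Tuple
--
-- def _distance(a: Tuple[int, int], b: Tuple[int, int]) -> int:
--     return abs(a[0] - b[0]) + abs(a[1] - b[1])
--
-- def _expanded_distance(a: Tuple[int, int], b: Tuple[int, int],
--                        empty_rows: List[int], empty_cols: List[int],
--                        expansion_factor: int) -> int:
--     """
--     Distanza manhattan tra a e b considerando che le righe/colonne vuote
--     valgono 'expansion_factor' invece di 1.
--     """
--     base = _distance(a, b)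
--     r1, r2 = sorted((a[0], b[0]))
--     c1, c2 = sorted((a[1], b[1]))
--
--     extra_rows = sum(1 for r in empty_rows if r1 < r < r2)
--     extra_cols = sum(1 for c in empty_cols if c1 < c < c2)
--
--     # Ogni riga/colonna vuota aggiunge (expansion_factor - 1) alla distanza
--     return base + (extra_rows + extra_cols) * (expansion_factor - 1)
-- ===== SOURCE B (Python) =====
-- def _prefix_count(xs, pred):
--     # length of the maximal prefix of sorted xs satisfying the downward-closed pred
--     lo, hi = 0, len(xs)
--     while lo < hi:
--         mid = (lo + hi) // 2
--         if pred(xs[mid]):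
--             lo = mid + 1
--         else:
--             hi = mid
--     return lo
--
-- def _extra_between(empties, p, q):
--     lo, hi = (p, q) if p <= q else (q, p)
--     if lo >= hi:
--         return 0
--     xs = sorted(empties)
--     return _prefix_count(xs, lambda v: v < hi) - _prefix_count(xs, lambda v: v <= lo)
--
-- def _expanded_distance(a, b, empty_rows, empty_cols, expansion_factor):
--     base = abs(a[0] - b[0]) + abs(a[1] - b[1])
--     extra = _extra_between(empty_rows, a[0], b[0]) + _extra_between(empty_cols, a[1], b[1])
--     return base + extra * (expansion_factor - 1)
-- ===== Notes on version B (the rewrite author's own statement) =====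
-- stated objective: alternative
-- what changed: A counts empty rows/cols between the endpoints with two linear generator scans; B sorts each empties list once and obtains the strict-between count as the difference of two hand-rolled binary-search prefix counts (bisect_left(hi) - bisect_right(lo)), skipping the work entirely when the coordinates coincide.
import Mathlib
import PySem

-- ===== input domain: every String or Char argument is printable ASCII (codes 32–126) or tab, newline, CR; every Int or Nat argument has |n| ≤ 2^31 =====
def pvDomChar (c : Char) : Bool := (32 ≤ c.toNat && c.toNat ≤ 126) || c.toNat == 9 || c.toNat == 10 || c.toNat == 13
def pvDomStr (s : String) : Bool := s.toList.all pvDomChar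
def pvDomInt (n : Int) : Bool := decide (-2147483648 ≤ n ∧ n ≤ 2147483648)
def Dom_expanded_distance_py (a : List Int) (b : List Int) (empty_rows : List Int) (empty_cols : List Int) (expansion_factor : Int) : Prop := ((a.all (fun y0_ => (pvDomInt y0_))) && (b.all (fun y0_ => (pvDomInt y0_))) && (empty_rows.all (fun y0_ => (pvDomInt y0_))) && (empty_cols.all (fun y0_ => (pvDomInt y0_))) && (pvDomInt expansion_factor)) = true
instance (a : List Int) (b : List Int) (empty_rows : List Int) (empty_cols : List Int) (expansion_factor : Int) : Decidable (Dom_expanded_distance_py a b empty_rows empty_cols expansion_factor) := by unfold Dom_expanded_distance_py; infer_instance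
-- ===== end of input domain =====

-- B replaces A's two linear scans over empty_rows/empty_cols by sort-plus-binary-search
-- (prefix counts on the sorted list); objective: alternative algorithm, not claimed faster.

-- ===== PORT A =====

-- a[i] for i = 0,1; Pre_ guarantees the index is in range, so the .getD default is never read there
def pvGet (l : List Int) (i : Int) : Int := (PySem.List.pyGet? l i).getD 0

-- helper _distance: abs(a[0]-b[0]) + abs(a[1]-b[1])
def pvDistance (a b : List Int) : Int := |pvGet a 0 - pvGet b 0| + |pvGet a 1 - pvGet b 1|

def expanded_distance_py (a : List Int) (b : List Int) (empty_rows : List Int) (empty_cols : List Int) (expansion_factor : Int) : Int :=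
  let base := pvDistance a b
  -- r1, r2 = sorted((a[0], b[0])) : sorted of a 2-tuple is exactly (min, max)
  let r1 := min (pvGet a 0) (pvGet b 0)
  let r2 := max (pvGet a 0) (pvGet b 0)
  let c1 := min (pvGet a 1) (pvGet b 1)
  let c2 := max (pvGet a 1) (pvGet b 1)
  let extra_rows : Int := empty_rows.foldl (fun acc r => if r1 < r ∧ r < r2 then acc + 1 else acc) 0
  let extra_cols : Int := empty_cols.foldl (fun acc c => if c1 < c ∧ c < c2 then acc + 1 else acc) 0
  base + (extra_rows + extra_cols) * (expansion_factor - 1)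

-- ===== PORT B =====

-- _prefix_count: binary search for the length of the pred-true prefix of a sorted list
def pvPrefixCount (pred : Int → Bool) (xs : List Int) (lo hi : Nat) : Nat :=
  if _h : lo < hi then
    if pred (xs.getD ((lo + hi) / 2) 0) then pvPrefixCount pred xs ((lo + hi) / 2 + 1) hi
    else pvPrefixCount pred xs lo ((lo + hi) / 2)
  else lo
termination_by hi - lo
decreasing_by all_goals omega

-- _extra_between
def pvExtraBetween (empties : List Int) (p q : Int) : Int :=
  let lo := if p ≤ q then p else q
  let hi := if p ≤ q then q else p
  if lo ≥ hi then 0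
  else
    let xs := PySem.List.sorted empties (fun x => x)
    (pvPrefixCount (fun v => v < hi) xs 0 xs.length : Int)
      - (pvPrefixCount (fun v => v ≤ lo) xs 0 xs.length : Int)

def expanded_distance_py_alt (a : List Int) (b : List Int) (empty_rows : List Int) (empty_cols : List Int) (expansion_factor : Int) : Int :=
  let base := |pvGet a 0 - pvGet b 0| + |pvGet a 1 - pvGet b 1|
  let extra := pvExtraBetween empty_rows (pvGet a 0) (pvGet b 0)
      + pvExtraBetween empty_cols (pvGet a 1) (pvGet b 1)
  base + extra * (expansion_factor - 1)

-- ===== PRECONDITION & SPEC =====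
-- Python A indexes a[0], a[1], b[0], b[1]; it raises IndexError unless both lists have length ≥ 2.
def Pre_expanded_distance_py (a : List Int) (b : List Int) (empty_rows : List Int) (empty_cols : List Int) (expansion_factor : Int) : Prop :=
  2 ≤ a.length ∧ 2 ≤ b.length
instance (a : List Int) (b : List Int) (empty_rows : List Int) (empty_cols : List Int) (expansion_factor : Int) : Decidable (Pre_expanded_distance_py a b empty_rows empty_cols expansion_factor) := by unfold Pre_expanded_distance_py; infer_instance

def pvWitness_expanded_distance_py : List Int × List Int × List Int × List Int × Int := ([0, 0], [3, 4], [1], [2], 10)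

def Spec_expanded_distance_py (a : List Int) (b : List Int) (empty_rows : List Int) (empty_cols : List Int) (expansion_factor : Int) (out : Int) : Prop := out = expanded_distance_py_alt a b empty_rows empty_cols expansion_factor
instance (a : List Int) (b : List Int) (empty_rows : List Int) (empty_cols : List Int) (expansion_factor : Int) (out : Int) : Decidable (Spec_expanded_distance_py a b empty_rows empty_cols expansion_factor out) := by unfold Spec_expanded_distance_py; infer_instance

-- ===== CLAIM (what is proved, stated in full; the proofs are below) =====
def Claim_equal_expanded_distance_py : Prop := ∀ (a : List Int) (b : List Int) (empty_rows : List Int) (empty_cols : List Int) (expansion_factor : Int), Dom_expanded_distance_py a b empty_rows empty_cols expansion_factor → Pre_expanded_distance_py a b empty_rows empty_cols expansion_factor → Spec_expanded_distance_py a b empty_rows empty_cols expansion_factor (expanded_distance_py a b empty_rows empty_cols expansion_factor)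

-- ===== LEMMAS AND PROOFS =====

-- A's counting foldl is countP
theorem foldl_count_eq (p : Int → Prop) [DecidablePred p] (l : List Int) (acc : Int) :
    l.foldl (fun acc r => if p r then acc + 1 else acc) acc
      = acc + l.countP (fun r => decide (p r)) := by
  induction l generalizing acc with
  | nil => simp
  | cons x t ih =>
      by_cases hx : p x <;> simp [List.countP_cons, hx, ih] <;> ring

-- countP of a list whose pred-true elements are exactly a prefix
theorem countP_eq_of_prefix (pred : Int → Bool) :
    ∀ (l : List Int) (k : Nat), k ≤ l.length →
      (∀ i (h : i < l.length), pred l[i] = true ↔ i < k) →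
      l.countP pred = k := by
  intro l
  induction l with
  | nil => intro k hk _; simp at hk ⊢; omega
  | cons x t ih =>
      intro k hk hiff
      cases k with
      | zero =>
          have hx : pred x = false := by
            have := hiff 0 (by simp)
            simpa using this
          have ht : t.countP pred = 0 := by
            apply ih 0 (Nat.zero_le _)
            intro i h
            have := hiff (i + 1) (by simpa using Nat.succ_lt_succ h)
            simpa using this
          simp [List.countP_cons, hx, ht]
      | succ k' =>
          have hx : pred x = true := (hiff 0 (by simp)).mpr (Nat.succ_pos _)
          have ht : t.countP pred = k' := by
            apply ih k' (by simpa using hk)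
            intro i h
            have := hiff (i + 1) (by simpa using Nat.succ_lt_succ h)
            simpa [Nat.succ_lt_succ_iff] using this
          simp [List.countP_cons, hx, ht]

-- the binary search computes countP on a sorted list, for a downward-closed predicate
theorem pvPrefixCount_spec (pred : Int → Bool) (xs : List Int)
    (hsort : xs.Pairwise (· ≤ ·))
    (hdc : ∀ x y : Int, x ≤ y → pred y = true → pred x = true) :
    ∀ (n lo hi : Nat), hi - lo = n → lo ≤ hi → hi ≤ xs.length →
      (∀ i (h : i < xs.length), i < lo → pred xs[i] = true) →
      (∀ i (h : i < xs.length), hi ≤ i → pred xs[i] = false) →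
      pvPrefixCount pred xs lo hi = xs.countP pred := by
  have hget : ∀ (i j : Nat) (hij : i ≤ j) (hj : j < xs.length), xs[i]'(by omega) ≤ xs[j] := by
    intro i j hij hj
    rcases Nat.lt_or_ge i j with h | h
    · exact List.pairwise_iff_getElem.mp hsort i j (by omega) hj h
    · have : i = j := by omega
      subst this; exact le_refl _
  intro n
  induction n using Nat.strong_induction_on with
  | _ n ihn =>
    intro lo hi hn hlohi hhi hpre hpost
    rw [pvPrefixCount]
    split
    · next h =>
      have hmidlt : (lo + hi) / 2 < xs.length := by omega
      have hmid : xs.getD ((lo + hi) / 2) 0 = xs[(lo + hi) / 2] := by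
        simp [List.getD_eq_getElem?_getD, List.getElem?_eq_getElem hmidlt]
      rw [hmid]
      split
      · next hp =>
        apply ihn (hi - ((lo + hi) / 2 + 1)) (by omega) _ _ rfl (by omega) hhi
        · intro i hlen hi'
          rcases Nat.lt_or_ge i lo with h' | h'
          · exact hpre i hlen h'
          · exact hdc _ _ (hget i ((lo + hi) / 2) (by omega) hmidlt) hp
        · exact hpost
      · next hp =>
        apply ihn ((lo + hi) / 2 - lo) (by omega) _ _ rfl (by omega) (by omega) hpre
        intro i hlen hi'
        by_contra hcon
        have hc : pred xs[i] = true := by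
          cases hx : pred xs[i] with
          | false => exact absurd hx hcon
          | true => rfl
        have := hdc _ _ (hget ((lo + hi) / 2) i hi' hlen) hc
        simp [this] at hp
    · next h =>
      have hl : lo = hi := by omega
      subst hl
      exact (countP_eq_of_prefix pred xs lo hhi (by
        intro i hlen
        constructor
        · intro hp
          by_contra hge
          have := hpost i hlen (by omega)
          simp [this] at hp
        · exact hpre i hlen)).symm

-- strict-between count splits into the two prefix counts, when lo < hi
theorem countP_between (l : List Int) (lo hi : Int) (h : lo < hi) :
    ((l.countP (fun v => decide (v < hi)) : Int)
        - (l.countP (fun v => decide (v ≤ lo)) : Int))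
      = l.countP (fun r => decide (lo < r) && decide (r < hi)) := by
  induction l with
  | nil => simp
  | cons x t ih =>
      by_cases hx : x ≤ lo
      · have h1 : x < hi := lt_of_le_of_lt hx h
        simp [List.countP_cons, hx, h1, not_lt.mpr hx]
        push_cast
        omega
      · have hx : lo < x := lt_of_not_ge hx
        by_cases h2 : x < hi
        · simp [List.countP_cons, hx, h2, not_le.mpr hx]
          push_cast
          omega
        · have h2' : hi ≤ x := le_of_not_gt h2
          simp [List.countP_cons, not_lt.mpr h2', not_le.mpr hx, not_lt.mpr (le_trans (le_of_lt h) h2')]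
          push_cast
          omega

-- per-axis: A's scan equals B's sort + two binary searches
theorem extra_eq (l : List Int) (p q : Int) :
    l.foldl (fun acc r => if min p q < r ∧ r < max p q then acc + 1 else acc) (0 : Int)
      = pvExtraBetween l p q := by
  have hlo : (if p ≤ q then p else q) = min p q := (min_def p q).symm
  have hhi : (if p ≤ q then q else p) = max p q := (max_def p q).symm
  unfold pvExtraBetween
  rw [hlo, hhi]
  rw [foldl_count_eq (fun r => min p q < r ∧ r < max p q) l 0]
  have hconv : (fun r : Int => decide (min p q < r ∧ r < max p q))
      = (fun r : Int => decide (min p q < r) && decide (r < max p q)) := by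
    funext r; simp
  rw [hconv]
  by_cases hcase : max p q ≤ min p q
  · -- min = max: the strict-between predicate is everywhere false
    simp only [if_pos hcase]
    have : l.countP (fun r : Int => decide (min p q < r) && decide (r < max p q)) = 0 := by
      apply List.countP_eq_zero.mpr
      intro x _
      simp only [Bool.and_eq_true, decide_eq_true_eq, not_and]
      intro h1
      omega
    rw [this]
    simp
  · have hcase : min p q < max p q := not_le.mp hcase
    simp only [if_neg (not_le.mpr hcase)]
    set xs := PySem.List.sorted l (fun x => x) with hxs
    have hsort : xs.Pairwise (· ≤ ·) := by
      simpa using PySem.List.sorted_pairwise l (fun x => x)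
    have hperm : xs.Perm l := PySem.List.sorted_perm l (fun x => x) false
    have h1 : pvPrefixCount (fun v => v < max p q) xs 0 xs.length
        = xs.countP (fun v => decide (v < max p q)) := by
      apply pvPrefixCount_spec _ xs hsort
        (fun x y hxy hy => by simp_all; omega)
        xs.length 0 xs.length (by omega) (Nat.zero_le _) (le_refl _)
      · intro i h hi0; omega
      · intro i h hle; omega
    have h2 : pvPrefixCount (fun v => v ≤ min p q) xs 0 xs.length
        = xs.countP (fun v => decide (v ≤ min p q)) := by
      apply pvPrefixCount_spec _ xs hsort
        (fun x y hxy hy => by simp_all; omega)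
        xs.length 0 xs.length (by omega) (Nat.zero_le _) (le_refl _)
      · intro i h hi0; omega
      · intro i h hle; omega
    rw [h1, h2, countP_between xs (min p q) (max p q) hcase]
    rw [hperm.countP_eq]
    simp

-- ===== VERDICT (by name: the statement is the Claim_ definition above) =====
theorem expanded_distance_py_spec : Claim_equal_expanded_distance_py := by
  intro a b er ec ef _hdom _hpre
  unfold Spec_expanded_distance_py
  simp only [expanded_distance_py, expanded_distance_py_alt, pvDistance, extra_eq]
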